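-- pv_equiv track=rewrite | github.com/jjjen23/Programmers | 프로그래머스/2/12899. 124 나라의 숫자/124 나라의 숫자.py | solution
-- ===== SOURCE A (Python) =====
-- def solution(n):
--     answer = 0
--     index = [1,2,4]
--     tem = []
--     while n != 0:
--         n -= 1
--         t = n % 3
--         tem.append(str(index[t]))
--         n //= 3
--     tem.reverse()
--
--     answer = ''.join(tem)
--
--     return answer
-- ===== SOURCE B (Python) =====
-- def solution(n):
--     # Recursive bijective base-3 digit conversion: higher-order digits first,
--     # then the current digit -- no list accumulation, reverse or join needed.
--     if n == 0:
--         return ''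
--     return solution((n - 1) // 3) + str([1, 2, 4][(n - 1) % 3])
-- ===== Notes on version B (the rewrite author's own statement) =====
-- stated objective: simpler
-- what changed: Replaces the explicit while-loop that appends digit strings to a list, reverses it and joins, by a direct recursion on the same bijective base-3 recurrence that emits the higher-order digits via the recursive call before the current digit, so no list, reverse or join is needed.
import Mathlib
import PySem

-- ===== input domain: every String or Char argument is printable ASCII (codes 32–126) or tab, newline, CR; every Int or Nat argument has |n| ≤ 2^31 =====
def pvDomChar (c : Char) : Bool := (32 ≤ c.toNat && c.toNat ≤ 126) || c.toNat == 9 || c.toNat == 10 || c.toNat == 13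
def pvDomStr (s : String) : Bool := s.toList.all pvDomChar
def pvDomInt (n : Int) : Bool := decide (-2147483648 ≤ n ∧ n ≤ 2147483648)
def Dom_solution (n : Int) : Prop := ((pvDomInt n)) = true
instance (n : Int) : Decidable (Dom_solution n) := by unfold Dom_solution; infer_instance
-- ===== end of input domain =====

-- B replaces A's append-to-list / reverse / join loop by a direct recursion that
-- emits the higher-order digits (recursive call) before the current digit: simpler.

-- ===== PORT A =====
-- the while loop of A: while n != 0: n -= 1; t = n % 3; tem.append(str(index[t])); n //= 3
-- (for n < 0 the Python loop never terminates — excluded by Pre_; the n ≤ 0 guard only makes the port total)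
def solutionLoopA (n : Int) (tem : List String) : List String :=
  if n ≤ 0 then tem
  else
    let n1 := n - 1
    let t := PySem.Int.mod n1 3
    solutionLoopA (PySem.Int.floordiv n1 3)
      (tem ++ [PySem.Int.toStr (PySem.List.pyGetD ([1, 2, 4] : List Int) t 0)])
termination_by n.toNat
decreasing_by
  rw [PySem.Int.floordiv_eq_ediv_of_pos (by norm_num)]
  omega

def solution (n : Int) : String :=
  let tem := solutionLoopA n []
  PySem.Str.join "" tem.reverse

-- ===== PORT B =====
-- Source B's recursion; the string concatenation 'solution(...) + str(...)' is ported exactly as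
-- concatenation of the character lists (PySem.Chars), packed into a String at the top
def solutionAltChars (n : Int) : List Char :=
  if n ≤ 0 then []   -- Source B's base case returns the empty string; negative n excluded by Pre_, guard only for totality
  else
    solutionAltChars (PySem.Int.floordiv (n - 1) 3) ++
      PySem.Int.toChars (PySem.List.pyGetD ([1, 2, 4] : List Int) (PySem.Int.mod (n - 1) 3) 0)
termination_by n.toNat
decreasing_by
  rw [PySem.Int.floordiv_eq_ediv_of_pos (by norm_num)]
  omega

def solution_alt (n : Int) : String := String.ofList (solutionAltChars n)

-- ===== PRECONDITION & SPEC =====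
-- Pre_ excludes n < 0, on which Python A's while loop never terminates (no value is returned)
def Pre_solution (n : Int) : Prop := 0 ≤ n
instance (n : Int) : Decidable (Pre_solution n) := by unfold Pre_solution; infer_instance
def pvWitness_solution : Int := (7)

def Spec_solution (n : Int) (out : String) : Prop := out = solution_alt n
instance (n : Int) (out : String) : Decidable (Spec_solution n out) := by unfold Spec_solution; infer_instance

-- ===== CLAIM (what is proved, stated in full; the proofs are below) =====
def Claim_equal_solution : Prop := ∀ (n : Int), Dom_solution n → Pre_solution n → Spec_solution n (solution n)

-- ===== LEMMAS AND PROOFS =====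

theorem loopA_nonpos (n : Int) (tem : List String) (hn : n ≤ 0) :
    solutionLoopA n tem = tem := by
  rw [solutionLoopA]; simp [hn]

theorem loopA_pos (n : Int) (tem : List String) (hn : ¬ n ≤ 0) :
    solutionLoopA n tem = solutionLoopA (PySem.Int.floordiv (n - 1) 3)
      (tem ++ [PySem.Int.toStr (PySem.List.pyGetD ([1, 2, 4] : List Int) (PySem.Int.mod (n - 1) 3) 0)]) := by
  conv_lhs => rw [solutionLoopA]
  simp [hn]

theorem altChars_nonpos (n : Int) (hn : n ≤ 0) : solutionAltChars n = [] := by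
  rw [solutionAltChars]; simp [hn]

theorem altChars_pos (n : Int) (hn : ¬ n ≤ 0) :
    solutionAltChars n = solutionAltChars (PySem.Int.floordiv (n - 1) 3) ++
      PySem.Int.toChars (PySem.List.pyGetD ([1, 2, 4] : List Int) (PySem.Int.mod (n - 1) 3) 0) := by
  conv_lhs => rw [solutionAltChars]
  simp [hn]

-- A's loop only ever appends: the accumulator factors out
theorem solutionLoopA_shift (k : Nat) (n : Int) (hk : n.toNat ≤ k) (tem : List String) :
    solutionLoopA n tem = tem ++ solutionLoopA n [] := by
  induction k generalizing n tem with
  | zero =>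
    have hn : n ≤ 0 := by omega
    rw [loopA_nonpos n tem hn, loopA_nonpos n [] hn, List.append_nil]
  | succ k ih =>
    by_cases hn : n ≤ 0
    · rw [loopA_nonpos n tem hn, loopA_nonpos n [] hn, List.append_nil]
    · have hd : (PySem.Int.floordiv (n - 1) 3).toNat ≤ k := by
        rw [PySem.Int.floordiv_eq_ediv_of_pos (by norm_num)]
        omega
      rw [loopA_pos n tem hn, loopA_pos n [] hn, ih _ hd, ih _ hd ([] ++ _)]
      simp

-- the flattened reversed digit list of A's loop is exactly B's recursion
theorem solution_flatten (k : Nat) (n : Int) (hk : n.toNat ≤ k) (hn : 0 ≤ n) :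
    ((solutionLoopA n []).reverse.map String.toList).flatten = solutionAltChars n := by
  induction k generalizing n with
  | zero =>
    have h0 : n ≤ 0 := by omega
    rw [loopA_nonpos n [] h0, altChars_nonpos n h0]
    simp
  | succ k ih =>
    by_cases h0 : n ≤ 0
    · rw [loopA_nonpos n [] h0, altChars_nonpos n h0]; simp
    · have hm : 0 ≤ PySem.Int.floordiv (n - 1) 3 ∧ (PySem.Int.floordiv (n - 1) 3).toNat ≤ k := by
        rw [PySem.Int.floordiv_eq_ediv_of_pos (by norm_num)]
        omega
      rw [loopA_pos n [] h0, solutionLoopA_shift k _ hm.2, altChars_pos n h0, ← ih _ hm.2 hm.1]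
      simp [PySem.Int.toList_toStr]

-- ''.join is flatten of the character lists
theorem joinEmpty (parts : List (List Char)) : PySem.Chars.join [] parts = parts.flatten := by
  induction parts with
  | nil => simp [PySem.Chars.join_nil]
  | cons p rest ih =>
    cases rest with
    | nil => simp [PySem.Chars.join_singleton]
    | cons q r =>
      rw [PySem.Chars.join_cons_cons, ih]
      simp

-- ===== VERDICT (by name: the statement is the Claim_ definition above) =====
theorem solution_spec : Claim_equal_solution := by
  intro n _ hpre
  unfold Spec_solution solution solution_alt
  rw [PySem.Str.join]
  congr 1
  have h := solution_flatten n.toNat n le_rfl hpre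
  rw [show ("" : String).toList = [] from rfl, joinEmpty]
  simpa using h
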